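-- pv_equiv track=rewrite | github.com/phantrunghieu91/learning_python | Leetcode/dailyProblems/2486_appendCharsToMakeSubsequence.py | appendChars
-- ===== SOURCE A (Python) =====
-- def appendChars(s: str, t: str) -> int:
--   if len(s) == 0:
--     return len(t)
--   M, N = len(s), len(t)
--   i, j = 0, 0
--   count_t = 0
--   while i < M and j < N:
--     if s[i] == t[j]:
--       count_t += 1
--       j += 1
--     i += 1
--     if j == N:
--       break
--   return N - count_t
-- ===== SOURCE B (Python) =====
-- def appendChars(s: str, t: str) -> int:
--     # Index s once: for each character, the sorted list of its positions.
--     pos = {}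
--     for i, ch in enumerate(s):
--         pos.setdefault(ch, []).append(i)
--     matched = 0
--     cur = 0
--     for c in t:
--         lst = pos.get(c, [])
--         # binary search: first position in lst that is >= cur
--         lo, hi = 0, len(lst)
--         while lo < hi:
--             mid = (lo + hi) // 2
--             if lst[mid] < cur:
--                 lo = mid + 1
--             else:
--                 hi = mid
--         if lo == len(lst):
--             break
--         cur = lst[lo] + 1
--         matched += 1
--     return len(t) - matched
-- ===== Notes on version B (the rewrite author's own statement) =====
-- stated objective: alternative
-- what changed: Replaced the single two-pointer scan of s and t by a two-stage algorithm: first build a per-character index of positions in s, then walk t resolving each character's next occurrence with a hand-written binary search over its position list.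
import Mathlib
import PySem

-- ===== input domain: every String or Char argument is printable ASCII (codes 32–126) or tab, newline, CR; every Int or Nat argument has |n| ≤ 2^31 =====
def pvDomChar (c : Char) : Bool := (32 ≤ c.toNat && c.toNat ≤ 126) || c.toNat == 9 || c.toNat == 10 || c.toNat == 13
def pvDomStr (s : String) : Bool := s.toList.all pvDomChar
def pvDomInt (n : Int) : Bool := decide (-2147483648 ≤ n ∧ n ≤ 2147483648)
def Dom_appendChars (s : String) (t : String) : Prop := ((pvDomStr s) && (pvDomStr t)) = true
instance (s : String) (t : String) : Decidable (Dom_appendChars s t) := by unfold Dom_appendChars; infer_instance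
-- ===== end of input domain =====

-- B replaces A's single two-pointer scan by a per-character position index of s
-- plus a binary search per character of t (objective: alternative; not faster).

-- ===== PORT A =====
-- the while loop: i,j index pointers, count_t the matched counter; the inner
-- 'if j == N: break' is subsumed by the loop guard re-checked next iteration
def appendCharsLoopA (sl tl : List Char) (M N i j count : Nat) : Nat :=
  if h : i < M ∧ j < N then
    if (PySem.List.pyGet? sl (i : Int)).getD ' ' = (PySem.List.pyGet? tl (j : Int)).getD ' ' then
      appendCharsLoopA sl tl M N (i + 1) (j + 1) (count + 1)
    else
      appendCharsLoopA sl tl M N (i + 1) j count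
  else count
termination_by M - i
decreasing_by all_goals omega

def appendChars (s : String) (t : String) : Int :=
  if PySem.Str.len s = 0 then PySem.Str.len t
  else
    let sl := s.toList
    let tl := t.toList
    (PySem.Str.len t) - (appendCharsLoopA sl tl sl.length tl.length 0 0 0 : Int)

-- ===== PORT B =====
-- 'for i, ch in enumerate(s): pos.setdefault(ch, []).append(i)'
def buildPosGo (d : PySem.Dict Char (List Nat)) (i : Nat) : List Char → PySem.Dict Char (List Nat)
  | [] => d
  | x :: xs => buildPosGo (d.modify x [] (· ++ [i])) (i + 1) xs

-- the 'while lo < hi' binary search; lst[mid] is always in range here, getD 0 is exact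
def bsLoop (lst : List Nat) (cur lo hi : Nat) : Nat :=
  if _h : lo < hi then
    let mid := (lo + hi) / 2
    if lst.getD mid 0 < cur then bsLoop lst cur (mid + 1) hi else bsLoop lst cur lo mid
  else lo
termination_by hi - lo
decreasing_by all_goals omega

-- the 'for c in t' loop returning matched (break → 0)
def altLoop (pos : PySem.Dict Char (List Nat)) (cur : Nat) : List Char → Nat
  | [] => 0
  | c :: ts =>
    let lst := pos.getD c []
    let lo := bsLoop lst cur 0 lst.length
    if lo = lst.length then 0
    else 1 + altLoop pos (lst.getD lo 0 + 1) ts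

def appendChars_alt (s : String) (t : String) : Int :=
  (PySem.Str.len t) - (altLoop (buildPosGo PySem.Dict.empty 0 s.toList) 0 t.toList : Int)

-- ===== PRECONDITION & SPEC =====
def Spec_appendChars (s : String) (t : String) (out : Int) : Prop := out = appendChars_alt s t
instance (s : String) (t : String) (out : Int) : Decidable (Spec_appendChars s t out) := by unfold Spec_appendChars; infer_instance

-- ===== CLAIM (what is proved, stated in full; the proofs are below) =====
def Claim_equal_appendChars : Prop := ∀ (s : String) (t : String), Dom_appendChars s t → Spec_appendChars s t (appendChars s t)

-- ===== LEMMAS AND PROOFS =====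

-- common characterisation: the greedy subsequence-match count
def gMatch : List Char → List Char → Nat
  | [], _ => 0
  | _, [] => 0
  | x :: xs, c :: ts => if x = c then 1 + gMatch xs ts else gMatch xs (c :: ts)

theorem gMatch_nil_left (t : List Char) : gMatch [] t = 0 := by
  cases t <;> simp [gMatch]

theorem gMatch_nil_right (s : List Char) : gMatch s [] = 0 := by
  cases s <;> simp [gMatch]

-- ----- A side -----

theorem aLoop_eq_gMatch (sl tl : List Char) (i j count : Nat) :
    appendCharsLoopA sl tl sl.length tl.length i j count
      = count + gMatch (sl.drop i) (tl.drop j) := by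
  fun_induction appendCharsLoopA sl tl sl.length tl.length i j count with
  | case1 i j count h heq ih =>
    obtain ⟨hi, hj⟩ := h
    have hs : sl.drop i = sl[i] :: sl.drop (i + 1) := List.drop_eq_getElem_cons hi
    have ht : tl.drop j = tl[j] :: tl.drop (j + 1) := List.drop_eq_getElem_cons hj
    have hchar : sl[i] = tl[j] := by
      simpa [PySem.List.pyGet?_natCast, hi, hj, List.getElem?_eq_getElem] using heq
    rw [ih, hs, ht, gMatch, if_pos hchar]
    omega
  | case2 i j count h heq ih =>
    obtain ⟨hi, hj⟩ := h
    have hs : sl.drop i = sl[i] :: sl.drop (i + 1) := List.drop_eq_getElem_cons hi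
    have ht : tl.drop j = tl[j] :: tl.drop (j + 1) := List.drop_eq_getElem_cons hj
    have hchar : sl[i] ≠ tl[j] := by
      simpa [PySem.List.pyGet?_natCast, hi, hj, List.getElem?_eq_getElem] using heq
    rw [ih, hs, ht, gMatch, if_neg hchar, ← ht]
  | case3 i j count h =>
    rcases Nat.lt_or_ge i sl.length with hi | hi
    · have hj : tl.length ≤ j := by omega
      rw [List.drop_eq_nil_of_le hj, gMatch_nil_right]
      omega
    · rw [List.drop_eq_nil_of_le hi, gMatch_nil_left]
      omega

-- ----- B side -----

-- the positions of c in sl, offset by i (reference form of the index)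
def posL (c : Char) : List Char → Nat → List Nat
  | [], _ => []
  | x :: xs, i => if x = c then i :: posL c xs (i + 1) else posL c xs (i + 1)

theorem buildPosGo_getD (sl : List Char) (d : PySem.Dict Char (List Nat)) (i : Nat) (c : Char) :
    (buildPosGo d i sl).getD c [] = d.getD c [] ++ posL c sl i := by
  induction sl generalizing d i with
  | nil => simp [buildPosGo, posL]
  | cons x xs ih =>
    rw [buildPosGo, ih, posL, PySem.Dict.getD_modify]
    by_cases hc : c = x
    · simp [hc]
    · simp [hc, Ne.symm hc]

theorem mem_posL_lb (c : Char) (sl : List Char) (i m : Nat) (h : m ∈ posL c sl i) : i ≤ m := by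
  induction sl generalizing i with
  | nil => simp [posL] at h
  | cons x xs ih =>
    rw [posL] at h
    split at h
    · rcases List.mem_cons.1 h with h | h
      · omega
      · have := ih (i + 1) h; omega
    · have := ih (i + 1) h; omega

theorem mem_posL_ub (c : Char) (sl : List Char) (i m : Nat) (h : m ∈ posL c sl i) :
    m < i + sl.length := by
  induction sl generalizing i with
  | nil => simp [posL] at h
  | cons x xs ih =>
    rw [posL] at h
    split at h
    · rcases List.mem_cons.1 h with h | h
      · simp; omega
      · have := ih (i + 1) h; simp; omega
    · have := ih (i + 1) h; simp; omega

theorem posL_pairwise (c : Char) (sl : List Char) (i : Nat) :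
    (posL c sl i).Pairwise (· < ·) := by
  induction sl generalizing i with
  | nil => simp [posL]
  | cons x xs ih =>
    rw [posL]
    split
    · exact List.Pairwise.cons (fun m hm => by have := mem_posL_lb c xs (i+1) m hm; omega) (ih (i+1))
    · exact ih (i + 1)

theorem posL_eq_nil_iff (c : Char) (sl : List Char) (i : Nat) :
    posL c sl i = [] ↔ c ∉ sl := by
  induction sl generalizing i with
  | nil => simp [posL]
  | cons x xs ih =>
    rw [posL]
    by_cases hx : x = c
    · simp [hx]
    · simp [hx, ih (i + 1), Ne.symm hx]

theorem posL_append (c : Char) (u v : List Char) (i : Nat) :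
    posL c (u ++ v) i = posL c u i ++ posL c v (i + u.length) := by
  induction u generalizing i with
  | nil => simp [posL]
  | cons x xs ih =>
    rw [List.cons_append, posL, posL, ih]
    split <;> simp <;> ring_nf

theorem posL_head (c : Char) (sl : List Char) (i j : Nat) (rest : List Nat)
    (h : posL c sl i = j :: rest) :
    ∃ pre rest', sl = pre ++ c :: rest' ∧ c ∉ pre ∧ j = i + pre.length ∧
      posL c rest' (j + 1) = rest := by
  induction sl generalizing i with
  | nil => simp [posL] at h
  | cons x xs ih =>
    rw [posL] at h
    split at h
    · rename_i hx
      obtain ⟨hj, hr⟩ := List.cons.inj h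
      exact ⟨[], xs, by simp [hx], by simp, by simpa using hj.symm, by rw [← hr, ← hj]⟩
    · rename_i hx
      obtain ⟨pre, rest', hsl, hpre, hjv, hrest⟩ := ih (i + 1) h
      refine ⟨x :: pre, rest', by simp [hsl], ?_, by simp; omega, hrest⟩
      simp only [List.mem_cons, not_or]
      exact ⟨fun hh => hx hh.symm, hpre⟩

-- greedy matching via first occurrence
theorem gMatch_not_mem (sl' : List Char) (c : Char) (ts : List Char) (h : c ∉ sl') :
    gMatch sl' (c :: ts) = 0 := by
  induction sl' with
  | nil => rfl
  | cons x xs ih =>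
    simp only [List.mem_cons, not_or] at h
    rw [gMatch, if_neg (Ne.symm h.1)]
    exact ih h.2

theorem gMatch_split (pre rest ts : List Char) (c : Char) (h : c ∉ pre) :
    gMatch (pre ++ c :: rest) (c :: ts) = 1 + gMatch rest ts := by
  induction pre with
  | nil => simp [gMatch]
  | cons x xs ih =>
    simp only [List.mem_cons, not_or] at h
    rw [List.cons_append, gMatch, if_neg (Ne.symm h.1)]
    exact ih h.2

-- sorted-list indexing against the takeWhile prefix
theorem sorted_getD_lt_iff (lst : List Nat) (cur mid : Nat)
    (hp : lst.Pairwise (· < ·)) (hm : mid < lst.length) :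
    (lst.getD mid 0 < cur ↔ mid < (lst.takeWhile (fun x => decide (x < cur))).length) := by
  induction lst generalizing mid with
  | nil => simp at hm
  | cons a xs ih =>
    have hpx := (List.pairwise_cons.1 hp).1
    have hpr := (List.pairwise_cons.1 hp).2
    cases mid with
    | zero =>
      by_cases ha : a < cur <;> simp [List.takeWhile, ha]
    | succ m =>
      simp only [List.length_cons, Nat.succ_lt_succ_iff] at hm
      have hgg : (a :: xs).getD (m + 1) 0 = xs.getD m 0 := rfl
      by_cases ha : a < cur
      · rw [hgg]
        simpa [List.takeWhile, ha, Nat.succ_lt_succ_iff] using ih m hpr hm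
      · have hmem := List.getElem_mem hm
        have hlt2 := hpx _ hmem
        have hg : xs.getD m 0 = xs[m] := by
          simp [List.getD_eq_getElem?_getD, List.getElem?_eq_getElem hm]
        constructor
        · intro h2; omega
        · intro h2; simp [List.takeWhile, ha] at h2

-- binary search returns the takeWhile-prefix length
theorem bsLoop_eq (lst : List Nat) (cur lo hi : Nat)
    (hp : lst.Pairwise (· < ·))
    (hlo : lo ≤ (lst.takeWhile (fun x => decide (x < cur))).length)
    (hhi : (lst.takeWhile (fun x => decide (x < cur))).length ≤ hi)
    (hlen : hi ≤ lst.length) :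
    bsLoop lst cur lo hi = (lst.takeWhile (fun x => decide (x < cur))).length := by
  fun_induction bsLoop lst cur lo hi with
  | case1 lo hi h mid hlt ih =>
    have hm2 : lst.getD ((lo + hi) / 2) 0 < cur := hlt
    have hk := (sorted_getD_lt_iff lst cur ((lo + hi) / 2) hp (by omega)).1 hm2
    refine ih ?_ hhi hlen
    show (lo + hi) / 2 + 1 ≤ _
    omega
  | case2 lo hi h mid hge ih =>
    have hm2 : ¬ lst.getD ((lo + hi) / 2) 0 < cur := hge
    have hmid : (lo + hi) / 2 < lst.length := by omega
    have hk := sorted_getD_lt_iff lst cur ((lo + hi) / 2) hp hmid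
    refine ih hlo ?_ ?_
    · show _ ≤ (lo + hi) / 2
      omega
    · show (lo + hi) / 2 ≤ _
      omega
  | case3 lo hi h => omega

-- getD of a concatenation at the junction index
theorem getD_append_length (A B : List Nat) :
    (A ++ B).getD A.length 0 = B.getD 0 0 := by
  simp [List.getD_eq_getElem?_getD, List.getElem?_append_right (le_refl A.length)]

-- the takeWhile prefix of A ++ B when all of A passes and all of B fails
theorem takeWhile_append_all (A B : List Nat) (cur : Nat)
    (hA : ∀ a ∈ A, a < cur) (hB : ∀ b ∈ B, ¬ b < cur) :
    ((A ++ B).takeWhile (fun x => decide (x < cur))) = A := by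
  induction A with
  | nil =>
    cases B with
    | nil => rfl
    | cons b bs => simp [hB b (by simp)]
  | cons a as ih =>
    simp only [List.cons_append, List.takeWhile]
    rw [decide_eq_true (hA a (by simp))]
    simp [ih (fun a ha => hA a (by simp [ha]))]

-- MAIN B-side lemma
theorem altLoop_eq_gMatch (sl : List Char) (cur : Nat) (ts : List Char) :
    altLoop (buildPosGo PySem.Dict.empty 0 sl) cur ts = gMatch (sl.drop cur) ts := by
  induction ts generalizing cur with
  | nil => rw [altLoop, gMatch_nil_right]
  | cons c ts ih =>
    have hlst : (buildPosGo PySem.Dict.empty 0 sl).getD c [] = posL c sl 0 := by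
      rw [buildPosGo_getD]; simp
    rw [altLoop]
    simp only [hlst]
    have hsl : sl.take cur ++ sl.drop cur = sl := List.take_append_drop cur sl
    have hsplit : posL c sl 0
        = posL c (sl.take cur) 0 ++ posL c (sl.drop cur) (sl.take cur).length := by
      conv_lhs => rw [← hsl]
      rw [posL_append]; simp
    have hA : ∀ a ∈ posL c (sl.take cur) 0, a < cur := by
      intro a ha
      have := mem_posL_ub c (sl.take cur) 0 a ha
      simp at this
      omega
    have hB : ∀ b ∈ posL c (sl.drop cur) (sl.take cur).length, ¬ b < cur := by
      intro b hb
      have hlb := mem_posL_lb _ _ _ _ hb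
      rcases Nat.lt_or_ge sl.length cur with hc | hc
      · rw [List.drop_eq_nil_of_le (by omega)] at hb
        simp [posL] at hb
      · simp only [List.length_take] at hlb
        omega
    have hk : ((posL c sl 0).takeWhile (fun x => decide (x < cur)))
        = posL c (sl.take cur) 0 := by
      rw [hsplit]
      exact takeWhile_append_all _ _ cur hA hB
    have hbs : bsLoop (posL c sl 0) cur 0 (posL c sl 0).length
        = (posL c (sl.take cur) 0).length := by
      rw [bsLoop_eq (posL c sl 0) cur 0 (posL c sl 0).length (posL_pairwise c sl 0)
        (Nat.zero_le _) (List.IsPrefix.length_le (List.takeWhile_prefix _)) (le_refl _), hk]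
    rw [hbs]
    rcases hBnil : posL c (sl.drop cur) (sl.take cur).length with _ | ⟨j, rest⟩
    · -- no next occurrence: both sides 0
      have hcne : c ∉ sl.drop cur := (posL_eq_nil_iff c _ _).1 hBnil
      rw [if_pos (by rw [hsplit, hBnil]; simp), gMatch_not_mem _ _ _ hcne]
    · -- next occurrence at j
      have hlen : (posL c sl 0).length
          = (posL c (sl.take cur) 0).length + (j :: rest).length := by
        rw [hsplit, hBnil, List.length_append]
      rw [if_neg (by simp at hlen ⊢; omega)]
      have hget : (posL c sl 0).getD (posL c (sl.take cur) 0).length 0 = j := by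
        rw [hsplit, hBnil, getD_append_length]; rfl
      rw [hget]
      -- drop cur sl nonempty, so the offset is exactly cur
      have hclen : cur < sl.length := by
        by_contra hc
        rw [List.drop_eq_nil_of_le (by omega)] at hBnil
        simp [posL] at hBnil
      have hoff : (sl.take cur).length = cur := by
        simp [Nat.min_eq_left (Nat.le_of_lt hclen)]
      rw [hoff] at hBnil
      obtain ⟨pre, rest', hdec, hpre, hjv, _⟩ := posL_head c _ _ _ _ hBnil
      have hdropj : sl.drop (j + 1) = rest' := by
        have h1 : sl.drop (j + 1) = (sl.drop cur).drop (pre.length + 1) := by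
          rw [List.drop_drop]
          congr 1
          omega
        rw [h1, hdec, show pre ++ c :: rest' = (pre ++ [c]) ++ rest' by simp,
          List.drop_append_of_le_length (by simp)]
        simp
      rw [ih (j + 1), hdropj, hdec, gMatch_split _ _ _ _ hpre]

-- ===== VERDICT (by name: the statement is the Claim_ definition above) =====
theorem appendChars_spec : Claim_equal_appendChars := by
  intro s t _
  unfold Spec_appendChars appendChars appendChars_alt
  rw [altLoop_eq_gMatch]
  by_cases hs : PySem.Str.len s = 0
  · have hnil : s.toList = [] := by
      simpa [PySem.Str.len, PySem.Chars.len, List.length_eq_zero_iff] using hs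
    rw [if_pos hs, hnil]
    simp [gMatch_nil_left]
  · rw [if_neg hs]
    show PySem.Str.len t
        - (appendCharsLoopA s.toList t.toList s.toList.length t.toList.length 0 0 0 : Int)
      = PySem.Str.len t - (gMatch (List.drop 0 s.toList) t.toList : Int)
    have h := aLoop_eq_gMatch s.toList t.toList 0 0 0
    simp only [Nat.zero_add] at h
    rw [h]
    simp
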